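-- pv_equiv track=rewrite | github.com/Bouni/kicad-jlcpcb-tools | dataview_highlight.py | find_highlight_spans
-- ===== SOURCE A (Python) =====
-- def find_highlight_spans(text: str, terms: list[str]) -> list[tuple[int, int]]:
--     """Return merged `(start, end)` spans for all term matches in `text`."""
--     if not text or not terms:
--         return []
--
--     lowered_text = text.casefold()
--     spans: list[tuple[int, int]] = []
--
--     for term in terms:
--         start = 0
--         while True:
--             match_start = lowered_text.find(term, start)
--             if match_start == -1:
--                 break
--             match_end = match_start + len(term)
--             spans.append((match_start, match_end))
--             start = match_end
--
--     if not spans: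
--         return []
--
--     spans.sort()
--     merged = [spans[0]]
--     for start, end in spans[1:]:
--         last_start, last_end = merged[-1]
--         if start <= last_end:
--             merged[-1] = (last_start, max(last_end, end))
--         else:
--             merged.append((start, end))
--     return merged
-- ===== SOURCE B (Python) =====
-- def find_highlight_spans(text: str, terms: list[str]) -> list[tuple[int, int]]:
--     """Return merged `(start, end)` spans for all term matches in `text`."""
--     if not text or not terms:
--         return []
--
--     lowered = text.casefold()
--     n = len(lowered)
--     # Single forward sweep over positions: each term keeps a "next allowed
--     # start" so repeated-find restarts per term disappear.
--     nxt = [0] * len(terms)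
--     spans: list[tuple[int, int]] = []
--     for i in range(n):
--         for j, term in enumerate(terms):
--             if nxt[j] <= i and lowered.startswith(term, i):
--                 spans.append((i, i + len(term)))
--                 nxt[j] = i + len(term)
--
--     if not spans:
--         return []
--
--     # Merge with a current-interval accumulator instead of rewriting merged[-1].
--     ordered = sorted(spans)
--     merged: list[tuple[int, int]] = []
--     cur_s, cur_e = ordered[0]
--     for s, e in ordered[1:]:
--         if s <= cur_e:
--             cur_e = max(cur_e, e)
--         else:
--             merged.append((cur_s, cur_e))
--             cur_s, cur_e = s, e
--     merged.append((cur_s, cur_e))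
--     return merged
-- ===== Notes on version B (the rewrite author's own statement) =====
-- stated objective: alternative
-- what changed: B replaces A's per-term repeated str.find restarts with one forward sweep over the text positions that keeps a next-allowed-start cursor per term (emitting the same greedy non-overlapping matches), and merges with a current-interval accumulator instead of rewriting merged[-1]; Pre_ excludes nonempty text with an empty search term, on which A loops forever (find('', start) returns start again and again).
import Mathlib
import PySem

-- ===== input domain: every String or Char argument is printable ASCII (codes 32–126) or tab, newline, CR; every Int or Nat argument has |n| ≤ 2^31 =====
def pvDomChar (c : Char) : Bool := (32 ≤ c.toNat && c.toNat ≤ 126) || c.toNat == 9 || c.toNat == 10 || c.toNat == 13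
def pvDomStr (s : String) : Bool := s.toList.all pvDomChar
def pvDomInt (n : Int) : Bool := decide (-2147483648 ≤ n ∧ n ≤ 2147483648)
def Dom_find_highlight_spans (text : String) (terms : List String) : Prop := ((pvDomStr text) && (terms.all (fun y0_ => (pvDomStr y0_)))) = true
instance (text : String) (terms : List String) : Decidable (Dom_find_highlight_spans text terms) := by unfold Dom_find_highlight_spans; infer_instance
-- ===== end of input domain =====

-- B replaces A's per-term repeated str.find restarts by one forward sweep over the text
-- positions with a next-allowed-start cursor per term, and merges with a current-interval
-- accumulator; same merged spans (objective: alternative, similar cost).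

-- ===== PORT A =====
-- inner `while True` loop of A: repeated lowered_text.find(term, start); the
-- dite guard only makes the recursion total — for a nonempty term it always
-- holds whenever a match was found (start < match_end and match_end ≤ len(text)).
def pvALoop (lt term : List Char) (start : Nat) (acc : List (Int × Int)) : List (Int × Int) :=
  let m := PySem.Chars.findFrom lt term (start : Int)
  if m = -1 then acc
  else
    let e : Int := m + term.length
    if _h : start < e.toNat ∧ e.toNat ≤ lt.length then
      pvALoop lt term e.toNat (acc ++ [(m, e)])
    else acc ++ [(m, e)]
termination_by lt.length + 1 - start
decreasing_by omega

-- one step of A's merge loop: `merged[-1]` is read and rewritten in place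
def pvAMergeStep (merged : List (Int × Int)) (p : Int × Int) : List (Int × Int) :=
  match merged.getLast? with
  | some (ls, le) =>
      if p.1 ≤ le then merged.dropLast ++ [(ls, max le p.2)] else merged ++ [p]
  | none => merged ++ [p]   -- unreachable: merged starts nonempty

-- `casefold` is ported as Str.lower: they agree on the ASCII domain Dom_.
def find_highlight_spans (text : String) (terms : List String) : List (Int × Int) :=
  if text = "" ∨ terms = [] then []
  else
    let lowered := PySem.Str.lower text
    let spans := terms.foldl (fun acc term => pvALoop lowered.toList term.toList 0 acc) []
    if spans = [] then []
    else
      let sortedSpans := PySem.List.sorted2 spans (fun p => p.1) (fun p => p.2)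
      match sortedSpans with
      | [] => []
      | p :: rest => rest.foldl pvAMergeStep [p]

-- ===== PORT B =====
-- one step of B's inner loop over `enumerate(terms)`; `j` is always a valid index
-- into `nxt`, so `nxt[j]` is ported as getD and `nxt[j] = …` as set.
-- `lowered.startswith(term, i)` with 0 ≤ i ≤ len is exactly startswith on drop i.
def pvBStep (lowered : List Char) (i : Int) (st : List Int × List (Int × Int))
    (jt : Int × String) : List Int × List (Int × Int) :=
  let term := jt.2.toList
  if st.1.getD jt.1.toNat 0 ≤ i ∧ PySem.Chars.startswith (lowered.drop i.toNat) term then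
    (st.1.set jt.1.toNat (i + (term.length : Int)), st.2 ++ [(i, i + (term.length : Int))])
  else st

-- body of B's `for i in range(n)` loop
def pvBOuter (lowered : List Char) (terms : List String)
    (st : List Int × List (Int × Int)) (i : Int) : List Int × List (Int × Int) :=
  (PySem.List.enumerate terms).foldl (pvBStep lowered i) st

-- one step of B's merge loop: state = (finished intervals, current start, current end)
def pvBMergeStep (cur : List (Int × Int) × Int × Int) (p : Int × Int) :
    List (Int × Int) × Int × Int :=
  if p.1 ≤ cur.2.2 then (cur.1, cur.2.1, max cur.2.2 p.2)
  else (cur.1 ++ [(cur.2.1, cur.2.2)], p.1, p.2)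

def find_highlight_spans_alt (text : String) (terms : List String) : List (Int × Int) :=
  if text = "" ∨ terms = [] then []
  else
    let lowered := (PySem.Str.lower text).toList
    let n : Int := lowered.length
    let res := (PySem.List.pyRange 0 n).foldl (pvBOuter lowered terms)
      (terms.map (fun _ => (0 : Int)), ([] : List (Int × Int)))
    let spans := res.2
    if spans = [] then []
    else
      let ordered := PySem.List.sorted2 spans (fun p => p.1) (fun p => p.2)
      match ordered with
      | [] => []
      | p :: rest =>
          let fin := rest.foldl pvBMergeStep (([] : List (Int × Int)), p.1, p.2)
          fin.1 ++ [(fin.2.1, fin.2.2)]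

-- ===== PRECONDITION & SPEC =====
-- Pre_ excludes exactly the inputs on which A never returns: a nonempty text together
-- with an empty search term makes A's `while True` loop forever, since
-- lowered_text.find('', start) keeps returning start.
def Pre_find_highlight_spans (text : String) (terms : List String) : Prop :=
  text = "" ∨ ¬ ("" ∈ terms)
instance (text : String) (terms : List String) : Decidable (Pre_find_highlight_spans text terms) := by unfold Pre_find_highlight_spans; infer_instance

def pvWitness_find_highlight_spans : String × List String := ("abcabca", ["a", "bc"])

def Spec_find_highlight_spans (text : String) (terms : List String) (out : List (Int × Int)) : Prop := out = find_highlight_spans_alt text terms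
instance (text : String) (terms : List String) (out : List (Int × Int)) : Decidable (Spec_find_highlight_spans text terms out) := by unfold Spec_find_highlight_spans; infer_instance

-- ===== CLAIM (what is proved, stated in full; the proofs are below) =====
def Claim_equal_find_highlight_spans : Prop := ∀ (text : String) (terms : List String), Dom_find_highlight_spans text terms → Pre_find_highlight_spans text terms → Spec_find_highlight_spans text terms (find_highlight_spans text terms)

-- ===== LEMMAS AND PROOFS =====

-- greedy non-overlapping matches of `t` in `lt` from position `s` (A's inner loop, empty acc)
def pvS (lt t : List Char) (s : Nat) : List (Int × Int) := pvALoop lt t s []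

theorem pvALoop_acc (lt t : List Char) (s : Nat) (acc : List (Int × Int)) :
    pvALoop lt t s acc = acc ++ pvS lt t s := by
  have H : ∀ (k s : Nat) (acc : List (Int × Int)), lt.length + 1 - s ≤ k →
      pvALoop lt t s acc = acc ++ pvALoop lt t s [] := by
    intro k
    induction k with
    | zero =>
        intro s acc hs
        rw [pvALoop, pvALoop]
        dsimp only
        split_ifs with h1 h2
        · simp
        · omega
        · simp
    | succ k ih =>
        intro s acc hs
        rw [pvALoop, pvALoop]
        dsimp only
        split_ifs with h1 h2
        · simp
        · rw [ih _ _ (by omega), List.nil_append, ih _ [(_, _)] (by omega)]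
          simp
        · simp
  exact H (lt.length + 1 - s) s acc le_rfl

theorem pv_find_eq (l t : List Char) (k : Nat) (h : t <+: l.drop k)
    (hmin : ∀ i < k, ¬ t <+: l.drop i) : PySem.Chars.find l t = (k : Int) := by
  have hinf : PySem.Chars.isIn t l = true := by
    rw [← PySem.Chars.exists_prefix_drop_iff_isIn]
    exact ⟨k, h⟩
  have hne : PySem.Chars.find l t ≠ -1 := by
    rw [PySem.Chars.find_ne_neg_one_iff, ← PySem.Chars.isIn_iff_infix]; exact hinf
  have hge : 0 ≤ PySem.Chars.find l t := by
    have := PySem.Chars.neg_one_le_find l t; omega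
  obtain ⟨hpre, hm⟩ := PySem.Chars.find_spec (s := l) (sub := t) hge
  rcases lt_trichotomy (PySem.Chars.find l t).toNat k with hlt | heq | hgt
  · exact absurd hpre (hmin _ hlt)
  · omega
  · exact absurd h (hm _ hgt)

theorem pvS_match (lt t : List Char) (s : Nat) (ht : t ≠ []) (hm : t <+: lt.drop s)
    (hs : s ≤ lt.length) :
    pvS lt t s = ((s : Int), ((s + t.length : Nat) : Int)) :: pvS lt t (s + t.length) := by
  have htl : 0 < t.length := List.length_pos_iff.mpr ht
  have hle : s + t.length ≤ lt.length := by
    have := hm.length_le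
    simp [List.length_drop] at this
    omega
  have hfind : PySem.Chars.find (lt.drop s) t = (0 : Int) := by
    have := pv_find_eq (lt.drop s) t 0 (by simpa using hm) (by omega)
    simpa using this
  have hff : PySem.Chars.findFrom lt t (s : Int) = (s : Int) := by
    rw [PySem.Chars.findFrom_natCast lt t s hs, hfind]
    norm_num
  rw [pvS, pvALoop]
  dsimp only
  rw [hff]
  have hne : ((s : Int)) ≠ -1 := by omega
  rw [if_neg hne]
  have he : ((s : Int) + (t.length : Int)).toNat = s + t.length := by omega
  rw [dif_pos (by constructor <;> omega)]
  rw [he, pvALoop_acc]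
  simp [pvS]

theorem pvS_end (lt t : List Char) (ht : t ≠ []) : pvS lt t lt.length = [] := by
  have hfind : PySem.Chars.find (lt.drop lt.length) t = -1 := by
    rw [PySem.Chars.find_eq_neg_one_iff]
    simp [List.infix_nil, ht]
  rw [pvS, pvALoop]
  dsimp only
  rw [PySem.Chars.findFrom_natCast lt t lt.length le_rfl, hfind]
  simp

theorem pvS_no_match (lt t : List Char) (s : Nat) (ht : t ≠ []) (hm : ¬ t <+: lt.drop s)
    (hs : s < lt.length) :
    pvS lt t s = pvS lt t (s + 1) := by
  have htl : 0 < t.length := List.length_pos_iff.mpr ht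
  have hf := PySem.Chars.neg_one_le_find (lt.drop s) t
  rcases eq_or_lt_of_le hf with hneg | hpos
  · -- no occurrence at all from s
    have hfind : PySem.Chars.find (lt.drop s) t = -1 := hneg.symm
    have hfind1 : PySem.Chars.find (lt.drop (s + 1)) t = -1 := by
      rw [PySem.Chars.find_eq_neg_one_iff] at hfind ⊢
      intro hinf
      apply hfind
      have hsuf := List.drop_suffix 1 (lt.drop s)
      rw [List.drop_drop] at hsuf
      exact hinf.trans hsuf.isInfix
    rw [pvS, pvALoop, pvS, pvALoop]
    dsimp only
    rw [PySem.Chars.findFrom_natCast lt t s (by omega), hfind,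
      PySem.Chars.findFrom_natCast lt t (s + 1) (by omega), hfind1]
    simp
  · -- first occurrence at k ≥ 1
    have hge : (0 : Int) ≤ PySem.Chars.find (lt.drop s) t := by omega
    obtain ⟨hpre, hminf⟩ := PySem.Chars.find_spec (s := lt.drop s) (sub := t) hge
    set k := (PySem.Chars.find (lt.drop s) t).toNat with hk
    have hk1 : 1 ≤ k := by
      rcases Nat.eq_zero_or_pos k with h0 | h1
      · exfalso; apply hm; rw [h0] at hpre; simpa using hpre
      · exact h1
    have hdd : ∀ (a b : Nat), (lt.drop a).drop b = lt.drop (a + b) := by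
      intro a b; rw [List.drop_drop]
    have hpre' : t <+: lt.drop (s + k) := by rw [← hdd]; exact hpre
    have hfind1 : PySem.Chars.find (lt.drop (s + 1)) t = ((k - 1 : Nat) : Int) := by
      apply pv_find_eq
      · rw [hdd]; rw [show s + 1 + (k - 1) = s + k by omega]; exact hpre'
      · intro i hi
        rw [hdd]
        rw [show s + 1 + i = s + (1 + i) by omega, ← hdd]
        exact hminf (1 + i) (by omega)
    have hlen : s + k + t.length ≤ lt.length := by
      have := hpre'.length_le
      simp [List.length_drop] at this
      omega
    have hff : PySem.Chars.findFrom lt t (s : Int) = ((s + k : Nat) : Int) := by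
      rw [PySem.Chars.findFrom_natCast lt t s (by omega),
        show PySem.Chars.find (lt.drop s) t = (k : Int) by omega, if_neg (by omega)]
      omega
    have hff1 : PySem.Chars.findFrom lt t ((s + 1 : Nat) : Int) = ((s + k : Nat) : Int) := by
      rw [PySem.Chars.findFrom_natCast lt t (s + 1) (by omega), hfind1, if_neg (by omega)]
      omega
    rw [pvS, pvALoop, pvS, pvALoop]
    dsimp only
    rw [hff, hff1]
    rw [if_neg (by omega), if_neg (by omega)]
    rw [dif_pos (by omega), dif_pos (by omega)]

def pvZip (lowered : List Char) (i : Int) : List Int → List String → List Int × List (Int × Int)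
  | [], _ => ([], [])
  | s :: ss, [] => (s :: ss, [])
  | s :: ss, term :: ts =>
      let r := pvZip lowered i ss ts
      if s ≤ i ∧ PySem.Chars.startswith (lowered.drop i.toNat) term.toList then
        ((i + (term.toList.length : Int)) :: r.1, (i, i + (term.toList.length : Int)) :: r.2)
      else (s :: r.1, r.2)

theorem pv_getD_append_len (pre : List Int) (x : Int) (rest : List Int) :
    (pre ++ x :: rest).getD pre.length 0 = x := by
  induction pre with
  | nil => rfl
  | cons a l ih => simpa using ih

theorem pv_set_append_len (pre : List Int) (x v : Int) (rest : List Int) :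
    (pre ++ x :: rest).set pre.length v = pre ++ v :: rest := by
  induction pre with
  | nil => rfl
  | cons a l ih => simpa using ih

theorem pvInner (lowered : List Char) (i : Int) :
    ∀ (ts : List String) (k : Int) (pre nxt : List Int) (spans : List (Int × Int)),
    0 ≤ k → pre.length = k.toNat → nxt.length = ts.length →
    (PySem.List.enumerate ts k).foldl (pvBStep lowered i) (pre ++ nxt, spans)
      = (pre ++ (pvZip lowered i nxt ts).1, spans ++ (pvZip lowered i nxt ts).2) := by
  intro ts
  induction ts with
  | nil =>
      intro k pre nxt spans hk hpre hlen
      have : nxt = [] := List.eq_nil_of_length_eq_zero (by simpa using hlen)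
      subst this
      simp [PySem.List.enumerate, pvZip]
  | cons term ts ih =>
      intro k pre nxt spans hk hpre hlen
      obtain ⟨s, ss, rfl⟩ : ∃ s ss, nxt = s :: ss := by
        cases nxt with
        | nil => simp at hlen
        | cons a l => exact ⟨a, l, rfl⟩
      rw [PySem.List.enumerate_cons, List.foldl_cons]
      have hstep : pvBStep lowered i (pre ++ s :: ss, spans) (k, term)
          = if s ≤ i ∧ PySem.Chars.startswith (lowered.drop i.toNat) term.toList then
              (pre ++ (i + (term.toList.length : Int)) :: ss, spans ++ [(i, i + (term.toList.length : Int))])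
            else (pre ++ s :: ss, spans) := by
        unfold pvBStep
        have h1 : (pre ++ s :: ss).getD (k : Int).toNat 0 = s := by
          rw [← hpre]; exact pv_getD_append_len pre s ss
        have h2 : (pre ++ s :: ss).set (k : Int).toNat (i + (term.toList.length : Int))
            = pre ++ (i + (term.toList.length : Int)) :: ss := by
          rw [← hpre]; exact pv_set_append_len pre s _ ss
        simp only [h1, h2]
      rw [hstep]
      rw [pvZip]
      split_ifs with hc
      · have := ih (k + 1) (pre ++ [i + (term.toList.length : Int)]) ss
          (spans ++ [(i, i + (term.toList.length : Int))]) (by omega)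
          (by simp [hpre]; omega) (by simpa using hlen)
        simpa using this
      · have := ih (k + 1) (pre ++ [s]) ss spans (by omega)
          (by simp [hpre]; omega) (by simpa using hlen)
        simpa using this


def pvRest (lowered : List Char) (nxt : List Int) (ts : List String) (i : Nat) :
    List (Int × Int) :=
  ((nxt.zip ts).map (fun p => pvS lowered p.2.toList (max p.1.toNat i))).flatten

theorem pvZip_len (lowered : List Char) (i : Int) :
    ∀ (nxt : List Int) (ts : List String), nxt.length = ts.length →
    (pvZip lowered i nxt ts).1.length = ts.length := by
  intro nxt
  induction nxt with
  | nil => intro ts h; cases ts with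
    | nil => simp [pvZip]
    | cons a l => simp at h
  | cons s ss ih =>
      intro ts h
      cases ts with
      | nil => simp at h
      | cons term ts =>
          rw [pvZip]
          split_ifs with hc <;> simp [ih ts (by simpa using h)]

theorem pvZip_bounds (lowered : List Char) (i : Nat) (hi : i < lowered.length) :
    ∀ (nxt : List Int) (ts : List String), nxt.length = ts.length →
    (∀ s ∈ nxt, 0 ≤ s ∧ s ≤ (lowered.length : Int)) →
    ∀ s' ∈ (pvZip lowered (i : Int) nxt ts).1, 0 ≤ s' ∧ s' ≤ (lowered.length : Int) := by
  intro nxt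
  induction nxt with
  | nil => intro ts h hb; cases ts <;> simp [pvZip]
  | cons s ss ih =>
      intro ts h hb
      cases ts with
      | nil => simpa [pvZip] using hb
      | cons term ts =>
          rw [pvZip]
          have hss := ih ts (by simpa using h) (fun x hx => hb x (by simp [hx]))
          split_ifs with hc
          · intro s' hs'
            rcases List.mem_cons.mp hs' with rfl | hs'
            · rcases hc with ⟨hc1, hc2⟩
              have hpre : term.toList <+: lowered.drop ((i : Int)).toNat :=
                (PySem.Chars.startswith_iff _ _).mp hc2
              have := hpre.length_le
              simp only [List.length_drop, Int.toNat_natCast] at this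
              constructor <;> omega
            · exact hss s' hs'
          · intro s' hs'
            rcases List.mem_cons.mp hs' with rfl | hs'
            · exact hb s' (by simp)
            · exact hss s' hs'

theorem pv_perm_shuffle (z2 S' R' R : List (Int × Int)) (hp : (z2 ++ R').Perm R) :
    (z2 ++ (S' ++ R')).Perm (S' ++ R) := by
  rw [← List.append_assoc]
  refine (List.perm_append_comm.append_right R').trans ?_
  rw [List.append_assoc]
  exact hp.append_left S'

theorem pvZipRest (lowered : List Char) (i : Nat) (hi : i < lowered.length) :
    ∀ (nxt : List Int) (ts : List String), nxt.length = ts.length →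
    (∀ s ∈ nxt, 0 ≤ s ∧ s ≤ (lowered.length : Int)) →
    (∀ t ∈ ts, t.toList ≠ []) →
    ((pvZip lowered (i : Int) nxt ts).2
        ++ pvRest lowered (pvZip lowered (i : Int) nxt ts).1 ts (i + 1)).Perm
      (pvRest lowered nxt ts i) := by
  intro nxt
  induction nxt with
  | nil =>
      intro ts h hb ht
      cases ts with
      | nil => simp [pvZip, pvRest]
      | cons a l => simp at h
  | cons s ss ih =>
      intro ts h hb ht
      cases ts with
      | nil => simp at h
      | cons term ts =>
          have hb' : ∀ x ∈ ss, 0 ≤ x ∧ x ≤ (lowered.length : Int) :=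
            fun x hx => hb x (by simp [hx])
          have hbs := hb s (by simp)
          have htt : term.toList ≠ [] := ht term (by simp)
          have hperm := ih ts (by simpa using h) hb' (fun t htm => ht t (by simp [htm]))
          rw [pvZip]
          split_ifs with hc
          · -- emit: cursor ≤ i and term matches at i
            rcases hc with ⟨hc1, hc2⟩
            have hpre : term.toList <+: lowered.drop i := by
              have := (PySem.Chars.startswith_iff _ _).mp hc2
              simpa using this
            have hmax : max s.toNat i = i := by omega
            have hstep : pvS lowered term.toList (max s.toNat i)
                = ((i : Int), ((i + term.toList.length : Nat) : Int))
                    :: pvS lowered term.toList (i + term.toList.length) := by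
              rw [hmax]; exact pvS_match lowered term.toList i htt hpre (by omega)
            have hmax2 : max ((i : Int) + (term.toList.length : Int)).toNat (i + 1)
                = i + term.toList.length := by
              have h1 : 0 < term.toList.length := List.length_pos_iff.mpr htt
              omega
            simp only [pvRest, List.zip_cons_cons, List.map_cons, List.flatten_cons]
            rw [hstep, hmax2]
            simp only [List.cons_append]
            exact List.Perm.cons _ (pv_perm_shuffle _ _ _ _ hperm)
          · -- no emission for this term
            have heq : pvS lowered term.toList (max s.toNat (i + 1))
                = pvS lowered term.toList (max s.toNat i) := by
              by_cases hsi : s ≤ (i : Int)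
              · have h1 : max s.toNat i = i := by omega
                have h2 : max s.toNat (i + 1) = i + 1 := by omega
                have hnm : ¬ term.toList <+: lowered.drop i := by
                  intro hp
                  exact hc ⟨hsi, (PySem.Chars.startswith_iff _ _).mpr (by simpa using hp)⟩
                rw [h1, h2, pvS_no_match lowered term.toList i htt hnm hi]
              · have h1 : max s.toNat i = s.toNat := by omega
                have h2 : max s.toNat (i + 1) = s.toNat := by omega
                rw [h1, h2]
            simp only [pvRest, List.zip_cons_cons, List.map_cons, List.flatten_cons]
            rw [heq]
            exact pv_perm_shuffle _ _ _ _ hperm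

theorem pvRest_end (lowered : List Char) :
    ∀ (nxt : List Int) (ts : List String),
    (∀ s ∈ nxt, s ≤ (lowered.length : Int)) → (∀ t ∈ ts, t.toList ≠ []) →
    pvRest lowered nxt ts lowered.length = [] := by
  intro nxt
  induction nxt with
  | nil => intro ts hb ht; simp [pvRest]
  | cons s ss ih =>
      intro ts hb ht
      cases ts with
      | nil => simp [pvRest]
      | cons term ts =>
          simp only [pvRest, List.zip_cons_cons, List.map_cons, List.flatten_cons]
          have hmax : max s.toNat lowered.length = lowered.length := by
            have := hb s (by simp); omega
          rw [hmax, pvS_end lowered term.toList (ht term (by simp))]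
          have := ih ts (fun x hx => hb x (by simp [hx])) (fun t htm => ht t (by simp [htm]))
          simpa [pvRest] using this

theorem pv_pyRange_nil (a b : Int) (h : b ≤ a) : PySem.List.pyRange a b = [] := by
  simp [PySem.List.pyRange]
  intro h2
  omega

theorem pvOuterLoop (lowered : List Char) (terms : List String)
    (ht : ∀ t ∈ terms, t.toList ≠ []) :
    ∀ (k j : Nat) (nxt : List Int) (spans : List (Int × Int)),
    lowered.length - j ≤ k → j ≤ lowered.length →
    nxt.length = terms.length →
    (∀ s ∈ nxt, 0 ≤ s ∧ s ≤ (lowered.length : Int)) →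
    (((PySem.List.pyRange (j : Int) (lowered.length : Int)).foldl
        (pvBOuter lowered terms) (nxt, spans)).2).Perm
      (spans ++ pvRest lowered nxt terms j) := by
  intro k
  induction k with
  | zero =>
      intro j nxt spans hk hj hlen hb
      have hj' : j = lowered.length := by omega
      subst hj'
      rw [pv_pyRange_nil _ _ le_rfl, List.foldl_nil]
      rw [pvRest_end lowered nxt terms (fun s hs => (hb s hs).2) ht]
      simp
  | succ k ih =>
      intro j nxt spans hk hj hlen hb
      rcases Nat.eq_or_lt_of_le hj with hj' | hj'
      · subst hj'
        rw [pv_pyRange_nil _ _ le_rfl, List.foldl_nil]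
        rw [pvRest_end lowered nxt terms (fun s hs => (hb s hs).2) ht]
        simp
      · rw [PySem.List.pyRange_one_cons (by exact_mod_cast hj'), List.foldl_cons]
        have hinner : pvBOuter lowered terms (nxt, spans) (j : Int)
            = ((pvZip lowered (j : Int) nxt terms).1, spans ++ (pvZip lowered (j : Int) nxt terms).2) := by
          unfold pvBOuter
          have := pvInner lowered (j : Int) terms 0 [] nxt spans le_rfl rfl hlen
          simpa using this
        rw [hinner]
        have hcast : (j : Int) + 1 = ((j + 1 : Nat) : Int) := by push_cast; ring
        rw [hcast]
        have hz := pvZipRest lowered j hj' nxt terms hlen hb ht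
        have hlen' : (pvZip lowered (j : Int) nxt terms).1.length = terms.length :=
          pvZip_len lowered (j : Int) nxt terms hlen
        have hb' := pvZip_bounds lowered j hj' nxt terms hlen hb
        have := ih (j + 1) (pvZip lowered (j : Int) nxt terms).1
          (spans ++ (pvZip lowered (j : Int) nxt terms).2) (by omega) (by omega) hlen' hb'
        refine this.trans ?_
        rw [List.append_assoc]
        exact (hz.append_left spans)

theorem pvRest_zero (lowered : List Char) :
    ∀ (ts : List String),
    pvRest lowered (ts.map (fun _ => (0 : Int))) ts 0
      = (ts.map (fun t => pvS lowered t.toList 0)).flatten := by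
  intro ts
  induction ts with
  | nil => simp [pvRest]
  | cons term ts ih =>
      simp only [List.map_cons, pvRest, List.zip_cons_cons, List.flatten_cons] at *
      rw [ih]
      norm_num

theorem pvAFold (lt : List Char) :
    ∀ (ts : List String) (acc : List (Int × Int)),
    ts.foldl (fun acc term => pvALoop lt term.toList 0 acc) acc
      = acc ++ (ts.map (fun t => pvS lt t.toList 0)).flatten := by
  intro ts
  induction ts with
  | nil => intro acc; simp
  | cons term ts ih =>
      intro acc
      rw [List.foldl_cons, ih, pvALoop_acc]
      simp

theorem pv_sorted2_lex (xs : List (Int × Int)) :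
    PySem.List.sorted2 xs (fun p => p.1) (fun p => p.2)
      = PySem.List.sorted xs (fun p => toLex (p.1, p.2)) := by
  rw [PySem.List.sorted_eq_foldl_insertBy]
  unfold PySem.List.sorted2
  dsimp only
  rw [if_neg (by simp)]
  congr 1
  funext acc x
  congr 1
  funext a b
  by_cases h1 : a.1 < b.1 <;> by_cases h2 : b.1 < a.1 <;> by_cases h3 : a.2 < b.2 <;>
    simp [h1, h2, h3, Prod.Lex.lt_iff] <;> omega

theorem pv_sorted_of_perm (xs ys : List (Int × Int)) (hp : xs.Perm ys) :
    PySem.List.sorted xs (fun p => toLex (p.1, p.2))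
      = PySem.List.sorted ys (fun p => toLex (p.1, p.2)) := by
  have hinj : Function.Injective (fun p : Int × Int => toLex (p.1, p.2)) := by
    intro a b hab
    have := toLex.injective hab
    cases a; cases b; simpa using this
  refine PySem.List.eq_of_perm_of_pairwise_le_of_injective _ hinj ?_ ?_ ?_
  · exact (PySem.List.sorted_perm _ _ _).trans (hp.trans (PySem.List.sorted_perm _ _ _).symm)
  · exact PySem.List.sorted_pairwise _ _
  · exact PySem.List.sorted_pairwise _ _


theorem pvMerge_eq :
    ∀ (rest done : List (Int × Int)) (cs ce : Int),
    rest.foldl pvAMergeStep (done ++ [(cs, ce)])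
      = (rest.foldl pvBMergeStep (done, cs, ce)).1
          ++ [((rest.foldl pvBMergeStep (done, cs, ce)).2.1,
               (rest.foldl pvBMergeStep (done, cs, ce)).2.2)] := by
  intro rest
  induction rest with
  | nil => intro done cs ce; simp
  | cons p rest ih =>
      intro done cs ce
      rw [List.foldl_cons, List.foldl_cons]
      have hstep : pvAMergeStep (done ++ [(cs, ce)]) p
          = if p.1 ≤ ce then done ++ [(cs, max ce p.2)] else (done ++ [(cs, ce)]) ++ [p] := by
        unfold pvAMergeStep
        rw [List.getLast?_concat, List.dropLast_concat]
      rw [hstep]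
      unfold pvBMergeStep
      dsimp only
      split_ifs with hc
      · exact ih done cs (max ce p.2)
      · have := ih (done ++ [(cs, ce)]) p.1 p.2
        simpa using this

-- ===== VERDICT (by name: the statement is the Claim_ definition above) =====
theorem find_highlight_spans_spec : Claim_equal_find_highlight_spans := by
  unfold Claim_equal_find_highlight_spans
  intro text terms hdom hpre
  unfold Spec_find_highlight_spans find_highlight_spans find_highlight_spans_alt
  by_cases h0 : text = "" ∨ terms = []
  · rw [if_pos h0, if_pos h0]
  · rw [if_neg h0, if_neg h0]
    push Not at h0
    have htext : text ≠ "" := h0.1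
    have hterms : ∀ t ∈ terms, t.toList ≠ [] := by
      intro t htm h
      have ht' : t = "" := String.toList_eq_nil_iff.mp h
      rcases hpre with hp | hp
      · exact htext hp
      · exact hp (ht' ▸ htm)
    dsimp only
    set lt : List Char := (PySem.Str.lower text).toList with hlt
    have hpermBA :
        (((PySem.List.pyRange 0 (lt.length : Int)).foldl (pvBOuter lt terms)
            (terms.map (fun _ => (0 : Int)), ([] : List (Int × Int)))).2).Perm
          (terms.foldl (fun acc term => pvALoop lt term.toList 0 acc) []) := by
      have h1 := pvOuterLoop lt terms hterms lt.length 0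
        (terms.map (fun _ => (0 : Int))) [] (by omega) (by omega) (by simp)
        (by intro s hs; simp at hs; omega)
      rw [show ((0 : Nat) : Int) = (0 : Int) by norm_num] at h1
      refine h1.trans ?_
      rw [List.nil_append, pvRest_zero lt terms, pvAFold lt terms []]
      simp
    set spansB := ((PySem.List.pyRange 0 (lt.length : Int)).foldl (pvBOuter lt terms)
      (terms.map (fun _ => (0 : Int)), ([] : List (Int × Int)))).2 with hspansB
    set spansA := terms.foldl (fun acc term => pvALoop lt term.toList 0 acc) [] with hspansA
    by_cases hA : spansA = []
    · have hB : spansB = [] := by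
        rw [hA] at hpermBA
        exact List.Perm.eq_nil hpermBA
      rw [if_pos hA, if_pos hB]
    · have hB : spansB ≠ [] := by
        intro h
        have h2 := hpermBA.symm
        rw [h] at h2
        exact hA (List.Perm.eq_nil h2)
      rw [if_neg hA, if_neg hB]
      have hsorted : PySem.List.sorted2 spansB (fun p => p.1) (fun p => p.2)
          = PySem.List.sorted2 spansA (fun p => p.1) (fun p => p.2) := by
        rw [pv_sorted2_lex, pv_sorted2_lex]
        exact pv_sorted_of_perm _ _ hpermBA
      rw [hsorted]
      cases hL : PySem.List.sorted2 spansA (fun p => p.1) (fun p => p.2) with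
      | nil => rfl
      | cons p rest =>
          dsimp only
          have := pvMerge_eq rest [] p.1 p.2
          simpa using this
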